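-- pv_equiv track=rewrite | github.com/kosuketa/myscripts | src_ref_hyp_metric/torch_transformers/trainer.py | bool_check_onlyone_stands
-- ===== SOURCE A (Python) =====
-- import copy
--
-- def bool_check_onlyone_stands(bools):
--     length = len(bools)
--     length_ls = list(range(length))
--     for i in range(length):
--         if bools[i]:
--             copy_length_ls = copy.deepcopy(length_ls)
--             copy_length_ls.pop(i)
--             ex_is = copy_length_ls
--             for e_i in ex_is:
--                 if bools[e_i]:
--                     return False
--             return True
--         else:
--             continue
--     return False
-- ===== SOURCE B (Python) =====
-- def bool_check_onlyone_stands(bools):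
--     found = False
--     for b in bools:
--         if b:
--             if found:
--                 return False
--             found = True
--     return found
-- ===== Notes on version B (the rewrite author's own statement) =====
-- stated objective: simpler
-- what changed: Replaces A's find-first-true-then-deepcopy-pop-and-rescan-all-other-indices nested passes with a single linear pass keeping one 'found' flag and early-exiting on the second True.
import Mathlib
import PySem

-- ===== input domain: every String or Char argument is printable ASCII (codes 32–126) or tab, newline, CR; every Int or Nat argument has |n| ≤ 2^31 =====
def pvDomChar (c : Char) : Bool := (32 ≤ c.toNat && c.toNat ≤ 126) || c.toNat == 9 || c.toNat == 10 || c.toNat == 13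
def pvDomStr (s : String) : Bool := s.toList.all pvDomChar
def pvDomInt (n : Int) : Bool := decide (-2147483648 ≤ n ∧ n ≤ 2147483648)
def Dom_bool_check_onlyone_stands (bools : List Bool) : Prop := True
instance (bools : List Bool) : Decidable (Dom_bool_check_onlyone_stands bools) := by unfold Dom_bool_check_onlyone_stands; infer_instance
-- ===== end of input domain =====

-- B replaces A's nested find-then-rescan passes with one linear pass over a 'found' flag (objective: simpler).

-- ===== PORT A =====
-- inner loop 'for e_i in ex_is: if bools[e_i]: return False / return True';
-- every index in ex_is is in range, so Python's bools[e_i] equals getD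
def aInner (bools : List Bool) : List Nat → Bool
  | [] => true
  | e :: rest => if bools.getD e false then false else aInner bools rest

-- outer loop over the index list 'for i in range(length)'; 'copy.deepcopy' then '.pop(i)'
-- is List.eraseIdx i on the (unmutated) copy
def aOuter (bools : List Bool) : List Nat → Bool
  | [] => false
  | i :: rest =>
    if bools.getD i false then
      aInner bools ((List.range bools.length).eraseIdx i)
    else
      aOuter bools rest

def bool_check_onlyone_stands (bools : List Bool) : Bool :=
  aOuter bools (List.range bools.length)

-- ===== PORT B =====
-- single pass: 'found' flag, return False on the second True, return found at the end
def bLoop : List Bool → Bool → Bool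
  | [], found => found
  | b :: rest, found =>
    if b then (if found then false else bLoop rest true) else bLoop rest found

def bool_check_onlyone_stands_alt (bools : List Bool) : Bool :=
  bLoop bools false

-- ===== PRECONDITION & SPEC =====
def Spec_bool_check_onlyone_stands (bools : List Bool) (out : Bool) : Prop := out = bool_check_onlyone_stands_alt bools
instance (bools : List Bool) (out : Bool) : Decidable (Spec_bool_check_onlyone_stands bools out) := by unfold Spec_bool_check_onlyone_stands; infer_instance

-- ===== CLAIM (what is proved, stated in full; the proofs are below) =====
def Claim_equal_bool_check_onlyone_stands : Prop := ∀ (bools : List Bool), Dom_bool_check_onlyone_stands bools → Spec_bool_check_onlyone_stands bools (bool_check_onlyone_stands bools)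

-- ===== LEMMAS AND PROOFS =====

theorem aInner_map_succ (b : Bool) (bs : List Bool) (l : List Nat) :
    aInner (b :: bs) (l.map Nat.succ) = aInner bs l := by
  induction l with
  | nil => rfl
  | cons e rest ih => simp [aInner, ih]

theorem aInner_range (bs : List Bool) :
    aInner bs (List.range bs.length) = bs.all (fun x => !x) := by
  induction bs with
  | nil => rfl
  | cons b bs ih =>
    simp only [List.length_cons, List.range_succ_eq_map, aInner, List.getD_cons_zero]
    cases b with
    | false => simpa [aInner_map_succ] using ih
    | true => simp

theorem bLoop_true (bs : List Bool) : bLoop bs true = bs.all (fun x => !x) := by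
  induction bs with
  | nil => rfl
  | cons b bs ih => cases b <;> simp [bLoop, ih]

theorem aOuter_false_map_succ (bs : List Bool) (l : List Nat) :
    aOuter (false :: bs) (l.map Nat.succ) = aOuter bs l := by
  induction l with
  | nil => rfl
  | cons i rest ih =>
    simp only [List.map_cons, aOuter, List.getD_cons_succ]
    by_cases h : bs.getD i false = true
    · simp only [h, if_true, List.length_cons, List.range_succ_eq_map,
        List.eraseIdx_cons_succ, aInner, List.getD_cons_zero, Bool.false_eq_true, if_false,
        List.eraseIdx_map, aInner_map_succ]
    · simp only [List.getD] at h
      simp [h, ih, List.getD]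

theorem main_eq (bs : List Bool) :
    bool_check_onlyone_stands bs = bool_check_onlyone_stands_alt bs := by
  induction bs with
  | nil => rfl
  | cons b bs ih =>
    cases b with
    | false =>
      simpa [bool_check_onlyone_stands, bool_check_onlyone_stands_alt,
        List.range_succ_eq_map, aOuter, bLoop, aOuter_false_map_succ] using ih
    | true =>
      simp [bool_check_onlyone_stands, bool_check_onlyone_stands_alt,
        List.range_succ_eq_map, aOuter, bLoop, aInner_map_succ, aInner_range, bLoop_true]

-- ===== VERDICT (by name: the statement is the Claim_ definition above) =====
theorem bool_check_onlyone_stands_spec : Claim_equal_bool_check_onlyone_stands := by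
  intro bools _
  exact main_eq bools
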